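-- pv_equiv track=rewrite | github.com/Nidhi89717/Data-Structures-in-Python | 18_prob_stack.py | f_stk
-- ===== SOURCE A (Python) =====
-- def f_stk(n):
--     if n <= 1:
--         return 5
--
--     class Recursivecall:
--         def __init__(self, n, result = 0, is_completed = False):
--             self.n = n
--             self.result = result
--             self.is_completed = is_completed
--
--     stk =[Recursivecall(n)]
--
--     while stk:
--         n, result, is_completed = stk[-1].n, stk[-1].result, stk[-1].is_completed
--
--         if not is_completed:
--             if n<=1:
--                 stk.append(Recursivecall(n,5,True))
--             elif n%3 == 0:
--                 stk.append(Recursivecall(n-1-n%3, 6, False))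
--             else:
--                 stk.append(Recursivecall(n-1-n%2, 8, False))
--
--         else:
--             stk.pop()
--
--             if not stk:
--                 return result
--
--             stk[-1].result += result
--             stk[-1].is_completed = True
--
--     return None
-- ===== SOURCE B (Python) =====
-- def f_stk(n):
--     if n <= 1:
--         return 5
--     q, r = divmod(n - 2, 6)
--     return 30 * q + (13 if r == 0 else
--                      19 if r == 1 else
--                      27 if r == 2 else
--                      27 if r == 3 else
--                      33 if r == 4 else 35)
-- ===== Notes on version B (the rewrite author's own statement) =====
-- stated objective: faster
-- what changed: Replaces the explicit recursion-stack simulation of the weight-summing chain by a constant-time closed form exploiting that one full residue cycle of the chain decreases n by a fixed amount and adds a fixed total.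
import Mathlib
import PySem

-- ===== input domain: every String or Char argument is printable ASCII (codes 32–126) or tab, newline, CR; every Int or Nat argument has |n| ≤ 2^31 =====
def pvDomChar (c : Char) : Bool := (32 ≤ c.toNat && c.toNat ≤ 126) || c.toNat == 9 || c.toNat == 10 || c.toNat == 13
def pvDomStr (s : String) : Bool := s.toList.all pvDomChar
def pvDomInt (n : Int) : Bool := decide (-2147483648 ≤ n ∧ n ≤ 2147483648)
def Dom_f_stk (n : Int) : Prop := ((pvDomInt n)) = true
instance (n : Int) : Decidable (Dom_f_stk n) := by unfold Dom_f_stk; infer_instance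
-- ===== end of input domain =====

-- B replaces A's explicit recursion-stack simulation by an O(1) closed form (period-6 cycle adds 30).


-- ===== PORT A =====
-- the Recursivecall frame: n, result, is_completed
structure PvFrame where
  n : Int
  result : Int
  completed : Bool
deriving DecidableEq, Repr

-- the while loop over the stack (head = Python's stk[-1]); fuel is only a
-- totality guard, shown sufficient in the proofs (2*n.toNat+4 bounds the
-- number of iterations). The [] branch corresponds to Python's unreachable
-- final 'return None'.
def pvLoop (fuel : Nat) (stk : List PvFrame) : Int :=
  match fuel with
  | 0 => 0
  | fuel + 1 =>
    match stk with
    | [] => 0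
    | top :: rest =>
      if top.completed = false then
        if top.n ≤ 1 then
          pvLoop fuel (⟨top.n, 5, true⟩ :: top :: rest)
        else if PySem.Int.mod top.n 3 = 0 then
          pvLoop fuel (⟨top.n - 1 - PySem.Int.mod top.n 3, 6, false⟩ :: top :: rest)
        else
          pvLoop fuel (⟨top.n - 1 - PySem.Int.mod top.n 2, 8, false⟩ :: top :: rest)
      else
        match rest with
        | [] => top.result
        | p :: rs => pvLoop fuel (⟨p.n, p.result + top.result, true⟩ :: rs)

def f_stk (n : Int) : Int :=
  if n ≤ 1 then 5
  else pvLoop (2 * n.toNat + 4) [⟨n, 0, false⟩]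

-- ===== PORT B =====
def f_stk_alt (n : Int) : Int :=
  if n ≤ 1 then 5
  else
    let q := PySem.Int.floordiv (n - 2) 6
    let r := PySem.Int.mod (n - 2) 6
    30 * q + (if r = 0 then 13 else if r = 1 then 19 else if r = 2 then 27
              else if r = 3 then 27 else if r = 4 then 33 else 35)

-- ===== PRECONDITION & SPEC =====
def Spec_f_stk (n : Int) (out : Int) : Prop := out = f_stk_alt n
instance (n : Int) (out : Int) : Decidable (Spec_f_stk n out) := by unfold Spec_f_stk; infer_instance

-- ===== CLAIM (what is proved, stated in full; the proofs are below) =====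
def Claim_equal_f_stk : Prop := ∀ (n : Int), Dom_f_stk n → Spec_f_stk n (f_stk n)

-- ===== LEMMAS AND PROOFS =====

-- successor along A's chain
def pvStep (n : Int) : Int :=
  if PySem.Int.mod n 3 = 0 then n - 1 - PySem.Int.mod n 3 else n - 1 - PySem.Int.mod n 2

-- weight added at n
def pvW (n : Int) : Int := if PySem.Int.mod n 3 = 0 then 6 else 8

lemma pvStep_lt (n : Int) (h : ¬ n ≤ 1) : (pvStep n).toNat < n.toNat := by
  unfold pvStep
  have h3 := PySem.Int.mod_nonneg n (b := 3) (by norm_num)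
  have h2 := PySem.Int.mod_nonneg n (b := 2) (by norm_num)
  split_ifs with h0 <;> omega

-- the value A's stack machine computes, as a structural recursion
def pvS (n : Int) : Int :=
  if h : n ≤ 1 then 5 else pvW n + pvS (pvStep n)
termination_by n.toNat
decreasing_by exact pvStep_lt n h

-- iteration count of the machine below a frame with value n
def pvCost (n : Int) : Nat :=
  if h : n ≤ 1 then 2 else pvCost (pvStep n) + 2
termination_by n.toNat
decreasing_by exact pvStep_lt n h

lemma pvCost_le (n : Int) : pvCost n ≤ 2 * n.toNat + 2 := by
  by_cases h : n ≤ 1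
  · rw [pvCost, dif_pos h]; omega
  · rw [pvCost, dif_neg h]
    have hlt := pvStep_lt n h
    have ih := pvCost_le (pvStep n)
    omega
termination_by n.toNat
decreasing_by exact pvStep_lt n h

-- single machine steps
lemma pvLoop_step_small (n r : Int) (stk : List PvFrame) (f : Nat) (h : n ≤ 1) :
    pvLoop (f + 1) (⟨n, r, false⟩ :: stk) = pvLoop f (⟨n, 5, true⟩ :: ⟨n, r, false⟩ :: stk) := by
  simp [pvLoop, h]

lemma pvLoop_step_push (n r : Int) (stk : List PvFrame) (f : Nat) (h : ¬ n ≤ 1) :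
    pvLoop (f + 1) (⟨n, r, false⟩ :: stk)
      = pvLoop f (⟨pvStep n, pvW n, false⟩ :: ⟨n, r, false⟩ :: stk) := by
  by_cases h3 : (3 : Int) ∣ n <;> simp [pvLoop, pvStep, pvW, h, h3, PySem.Int.mod_eq_zero_iff_dvd]

lemma pvLoop_step_pop (n r : Int) (p : PvFrame) (rs : List PvFrame) (f : Nat) :
    pvLoop (f + 1) (⟨n, r, true⟩ :: p :: rs) = pvLoop f (⟨p.n, p.result + r, true⟩ :: rs) := by
  simp [pvLoop]

lemma pvLoop_ret (n r : Int) (f : Nat) : pvLoop (f + 1) [⟨n, r, true⟩] = r := by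
  simp [pvLoop]

-- running an incomplete frame consumes pvCost n fuel and completes it with result r + pvS n
lemma pvLoop_frame (n : Int) : ∀ (r : Int) (stk : List PvFrame) (f : Nat),
    pvLoop (pvCost n + f) (⟨n, r, false⟩ :: stk) = pvLoop f (⟨n, r + pvS n, true⟩ :: stk) := by
  by_cases h : n ≤ 1
  · intro r stk f
    rw [pvCost, dif_pos h, pvS, dif_pos h]
    rw [show 2 + f = (f + 1) + 1 by omega]
    rw [pvLoop_step_small n r stk (f + 1) h, pvLoop_step_pop n 5 ⟨n, r, false⟩ stk f]
  · intro r stk f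
    rw [pvCost, dif_neg h, pvS, dif_neg h]
    rw [show pvCost (pvStep n) + 2 + f = (pvCost (pvStep n) + (f + 1)) + 1 by omega]
    rw [pvLoop_step_push n r stk _ h]
    rw [pvLoop_frame (pvStep n) (pvW n) (⟨n, r, false⟩ :: stk) (f + 1)]
    rw [pvLoop_step_pop (pvStep n) (pvW n + pvS (pvStep n)) ⟨n, r, false⟩ stk f]
termination_by n.toNat
decreasing_by exact pvStep_lt n h

lemma f_stk_eq_pvS (n : Int) : f_stk n = pvS n := by
  by_cases h : n ≤ 1
  · rw [f_stk, if_pos h, pvS, dif_pos h]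
  · rw [f_stk, if_neg h]
    have hc := pvCost_le n
    rw [show 2 * n.toNat + 4 = pvCost n + ((2 * n.toNat + 3 - pvCost n) + 1) by omega]
    rw [pvLoop_frame n 0 [] _, pvLoop_ret]
    omega

lemma pvS_eq_alt (n : Int) : pvS n = f_stk_alt n := by
  by_cases h : n ≤ 1
  · rw [pvS, dif_pos h, f_stk_alt, if_pos h]
  · rw [pvS, dif_neg h]
    rw [pvS_eq_alt (pvStep n)]
    -- pure arithmetic on floordiv/mod by 2, 3, 6
    unfold pvStep pvW f_stk_alt
    have e6 : ∀ m : Int, PySem.Int.mod m 6 = m % 6 :=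
      fun m => PySem.Int.mod_eq_emod_of_pos (by norm_num)
    have d6 : ∀ m : Int, PySem.Int.floordiv m 6 = m / 6 :=
      fun m => PySem.Int.floordiv_eq_ediv_of_pos (by norm_num)
    rw [PySem.Int.mod_eq_emod_of_pos (a := n) (b := 3) (by norm_num),
        PySem.Int.mod_eq_emod_of_pos (a := n) (b := 2) (by norm_num)]
    simp only [e6, d6]
    split_ifs <;> omega
termination_by n.toNat
decreasing_by exact pvStep_lt n h

-- ===== VERDICT (by name: the statement is the Claim_ definition above) =====
theorem f_stk_spec : Claim_equal_f_stk := by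
  intro n _
  unfold Spec_f_stk
  rw [f_stk_eq_pvS, pvS_eq_alt]
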